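-- pv_equiv track=rewrite | github.com/thkoch2001/tvlfyi_depot | users/wpcarro/scratch/data_structures_and_algorithms/norman.py | handle_dels
-- ===== SOURCE A (Python) =====
-- def handle_dels(num_dels, i, xs):
--     if i < 0:
--         return -1
--
--     while xs[i] == '<':
--         num_dels += 1
--         i -= 1
--
--     while num_dels > 0 and xs[i] != '<':
--         num_dels -= 1
--         i -= 1
--
--     if xs[i] == '<':
--         return handle_dels(num_dels, i, xs)
--     else:
--         return i
-- ===== SOURCE B (Python) =====
-- def handle_dels(num_dels, i, xs):
--     # One uniform backward scan: '<' adds a pending deletion, any other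
--     # character either consumes a pending deletion or is the answer.
--     while i >= 0:
--         if xs[i] == '<':
--             num_dels += 1
--         elif num_dels > 0:
--             num_dels -= 1
--         else:
--             return i
--         i -= 1
--     return -1
-- ===== Notes on version B (the rewrite author's own statement) =====
-- stated objective: simpler
-- what changed: Replaces A's recursion with two phase-specific inner while loops by a single uniform backward loop that classifies each character once ('<' pushes a deletion, otherwise consume one or return), with the bounds check done before every read instead of only at recursion entry.
-- outside the precondition, e.g. on handle_dels(3, 1, 'ab'): A returns -2, B returns -1; on handle_dels(5, 1, 'ab'): A raises IndexError, B returns -1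
import Mathlib
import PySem

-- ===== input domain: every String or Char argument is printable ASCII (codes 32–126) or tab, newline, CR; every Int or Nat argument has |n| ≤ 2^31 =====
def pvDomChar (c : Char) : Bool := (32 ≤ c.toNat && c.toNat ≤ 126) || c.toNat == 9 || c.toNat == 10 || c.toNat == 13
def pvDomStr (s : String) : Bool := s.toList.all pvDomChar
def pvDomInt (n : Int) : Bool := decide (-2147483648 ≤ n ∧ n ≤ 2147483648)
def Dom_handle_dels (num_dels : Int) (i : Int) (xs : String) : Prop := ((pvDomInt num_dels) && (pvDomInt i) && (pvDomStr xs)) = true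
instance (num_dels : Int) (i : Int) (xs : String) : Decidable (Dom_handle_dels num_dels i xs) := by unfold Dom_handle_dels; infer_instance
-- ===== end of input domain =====

-- B replaces A's recursion-with-two-inner-whiles by one uniform backward loop (simpler decomposition, same cost).

-- ===== PORT A =====
-- first while loop: `while xs[i] == '<': num_dels += 1; i -= 1`
-- fuel-based: `none` = the IndexError path (xs[i] out of range) or fuel exhaustion (never reached
-- with the generous fuel handle_dels supplies)
def pvW1 : Nat → Int → Int → String → Option (Int × Int)
  | 0, _, _, _ => none
  | f+1, d, i, xs =>
    match PySem.Str.pyGet? xs i with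
    | none => none
    | some c => if c = '<' then pvW1 f (d+1) (i-1) xs else some (d, i)

-- second while loop: `while num_dels > 0 and xs[i] != '<': num_dels -= 1; i -= 1`
-- (short-circuit: xs[i] is only read when num_dels > 0, exactly as in Python)
def pvW2 : Nat → Int → Int → String → Option (Int × Int)
  | 0, _, _, _ => none
  | f+1, d, i, xs =>
    if d > 0 then
      match PySem.Str.pyGet? xs i with
      | none => none
      | some c => if c = '<' then some (d, i) else pvW2 f (d-1) (i-1) xs
    else some (d, i)

-- the body of A: guard, first while, second while, then tail-recurse or return
def pvA : Nat → Int → Int → String → Option Int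
  | 0, _, _, _ => none
  | f+1, num_dels, i, xs =>
    if i < 0 then some (-1)
    else
      match pvW1 f num_dels i xs with
      | none => none
      | some (d1, i1) =>
        match pvW2 f d1 i1 xs with
        | none => none
        | some (d2, i2) =>
          match PySem.Str.pyGet? xs i2 with
          | none => none
          | some c => if c = '<' then pvA f d2 i2 xs else some i2

-- every loop iteration and every recursive call moves i down by one, so this fuel is never
-- exhausted before A either returns or raises (raise = `none`, excluded by Pre_)
def handle_dels (num_dels : Int) (i : Int) (xs : String) : Int :=
  (pvA (2 * i.toNat + 2 * xs.toList.length + 8) num_dels i xs).getD 0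

-- ===== PORT B =====
-- Source B: one backward loop; '<' adds a pending deletion, any other character consumes one or is the answer
def pvB : Nat → Int → Int → String → Option Int
  | 0, _, _, _ => none
  | f+1, num_dels, i, xs =>
    if 0 ≤ i then
      match PySem.Str.pyGet? xs i with
      | none => none
      | some c =>
        if c = '<' then pvB f (num_dels+1) (i-1) xs
        else if num_dels > 0 then pvB f (num_dels-1) (i-1) xs
        else some i
    else some (-1)

-- i decreases by one each iteration, so this fuel always suffices
def handle_dels_alt (num_dels : Int) (i : Int) (xs : String) : Int :=
  (pvB ((i+1).toNat + 1) num_dels i xs).getD 0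

-- ===== PRECONDITION & SPEC =====
def pvChw (c : Char) : Int := if c = '<' then 1 else -1

-- sum of +1 (for '<') / -1 (other) over positions [a, b) of cs
def pvBal (cs : List Char) (a b : Nat) : Int := (((cs.drop a).take (b - a)).map pvChw).sum

-- Pre_ excludes i ≥ len(xs) and inputs whose backward scan runs past index 0: there A's negative
-- indices wrap around to the end of the string, and A raises IndexError or returns an accidental
-- wrapped index that is an artefact of Python wraparound, not a position of the scan.
-- (The ∃ k says: some non-'<' position k ≤ i already absorbs all deletions pending above it,
-- so the scan stops at an in-range index.)
def Pre_handle_dels (num_dels : Int) (i : Int) (xs : String) : Prop :=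
  i < PySem.Str.len xs ∧
    (i < 0 ∨ ∃ k ∈ List.range (i.toNat + 1),
      xs.toList[k]? ≠ some '<' ∧ num_dels + pvBal xs.toList (k+1) (i.toNat + 1) ≤ 0)
instance (num_dels : Int) (i : Int) (xs : String) : Decidable (Pre_handle_dels num_dels i xs) := by
  unfold Pre_handle_dels; infer_instance

def pvWitness_handle_dels : Int × Int × String := (1, 3, "ab<c")

def Spec_handle_dels (num_dels : Int) (i : Int) (xs : String) (out : Int) : Prop := out = handle_dels_alt num_dels i xs
instance (num_dels : Int) (i : Int) (xs : String) (out : Int) : Decidable (Spec_handle_dels num_dels i xs out) := by unfold Spec_handle_dels; infer_instance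

-- ===== CLAIM (what is proved, stated in full; the proofs are below) =====
def Claim_equal_handle_dels : Prop := ∀ (num_dels : Int) (i : Int) (xs : String), Dom_handle_dels num_dels i xs → Pre_handle_dels num_dels i xs → Spec_handle_dels num_dels i xs (handle_dels num_dels i xs)

-- ===== LEMMAS AND PROOFS =====

-- "B's scan, started at (d, i), returns k" — fuel-free form used by all invariants
def pvBret (xs : String) (d i k : Int) : Prop := ∃ f, pvB f d i xs = some k

theorem pvBret_neg {xs : String} {d i k : Int} (hi : i < 0) : pvBret xs d i k ↔ k = -1 := by
  constructor
  · rintro ⟨f, hf⟩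
    cases f with
    | zero => simp [pvB] at hf
    | succ f => simp [pvB, show ¬ (0:Int) ≤ i by omega] at hf; omega
  · rintro rfl
    exact ⟨1, by simp [pvB, show ¬ (0:Int) ≤ i by omega]⟩

theorem pvBret_nonneg_i {xs : String} {d i k : Int} (h : pvBret xs d i k) (hk : 0 ≤ k) : 0 ≤ i := by
  by_contra hi
  have := (pvBret_neg (by omega)).mp h
  omega

theorem pvBret_read {xs : String} {d i k : Int} (h : pvBret xs d i k) (hi : 0 ≤ i) :
    ∃ c, PySem.Str.pyGet? xs i = some c := by
  obtain ⟨f, hf⟩ := h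
  cases f with
  | zero => simp [pvB] at hf
  | succ f =>
    cases hr : PySem.Str.pyGet? xs i with
    | none => rw [pvB, if_pos hi, hr] at hf; simp at hf
    | some c => exact ⟨c, rfl⟩

theorem pvBret_step_lt {xs : String} {d i k : Int} (hi : 0 ≤ i)
    (hc : PySem.Str.pyGet? xs i = some '<') :
    pvBret xs d i k ↔ pvBret xs (d+1) (i-1) k := by
  constructor
  · rintro ⟨f, hf⟩
    cases f with
    | zero => simp [pvB] at hf
    | succ f =>
      rw [pvB, if_pos hi, hc] at hf
      exact ⟨f, by simpa using hf⟩
  · rintro ⟨f, hf⟩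
    refine ⟨f + 1, ?_⟩
    rw [pvB, if_pos hi, hc]
    simpa using hf

theorem pvBret_step_consume {xs : String} {d i k : Int} {c : Char} (hi : 0 ≤ i)
    (hc : PySem.Str.pyGet? xs i = some c) (hne : c ≠ '<') (hd : 0 < d) :
    pvBret xs d i k ↔ pvBret xs (d-1) (i-1) k := by
  constructor
  · rintro ⟨f, hf⟩
    cases f with
    | zero => simp [pvB] at hf
    | succ f =>
      rw [pvB, if_pos hi, hc] at hf
      simp [hne, hd] at hf
      exact ⟨f, hf⟩
  · rintro ⟨f, hf⟩
    refine ⟨f + 1, ?_⟩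
    rw [pvB, if_pos hi, hc]
    simpa [hne, hd] using hf

theorem pvBret_ret {xs : String} {d i k : Int} {c : Char} (hi : 0 ≤ i)
    (hc : PySem.Str.pyGet? xs i = some c) (hne : c ≠ '<') (hd : ¬ 0 < d) :
    pvBret xs d i k ↔ k = i := by
  constructor
  · rintro ⟨f, hf⟩
    cases f with
    | zero => simp [pvB] at hf
    | succ f =>
      rw [pvB, if_pos hi, hc] at hf
      simp [hne, hd] at hf
      omega
  · rintro rfl
    refine ⟨1, ?_⟩
    rw [pvB, if_pos hi, hc]
    simp [hne, hd]

theorem pvBret_toFuel {xs : String} {d i k : Int} (h : pvBret xs d i k) :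
    pvB ((i+1).toNat + 1) d i xs = some k := by
  obtain ⟨f, hf⟩ := h
  induction f generalizing d i k with
  | zero => simp [pvB] at hf
  | succ f IH =>
    by_cases hi : (0:Int) ≤ i
    · cases hr : PySem.Str.pyGet? xs i with
      | none => rw [pvB, if_pos hi, hr] at hf; simp at hf
      | some c =>
        rw [pvB, if_pos hi, hr] at hf
        have hfuel : (i + 1).toNat + 1 = ((i - 1) + 1).toNat + 1 + 1 := by omega
        rw [hfuel, pvB, if_pos hi, hr]
        by_cases hcc : c = '<'
        · simp only [if_pos hcc] at hf ⊢
          exact IH hf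
        · by_cases hd : 0 < d
          · simp only [if_neg hcc, if_pos hd] at hf ⊢
            exact IH hf
          · simp only [if_neg hcc, if_neg hd] at hf ⊢
            exact hf
    · rw [pvB, if_neg hi] at hf
      rw [pvB, if_neg hi]
      exact hf

theorem pvBal_succ (cs : List Char) (a b : Nat) (hab : a ≤ b) (hb : b < cs.length) :
    pvBal cs a (b+1) = pvBal cs a b + pvChw (cs.getD b ' ') := by
  unfold pvBal
  have h1 : b + 1 - a = (b - a) + 1 := by omega
  have h2 : (cs.drop a)[b - a]? = some cs[b] := by
    rw [List.getElem?_drop, show a + (b - a) = b by omega]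
    exact List.getElem?_eq_getElem hb
  rw [h1, List.take_add_one, h2, List.getD_eq_getElem cs ' ' hb]
  simp

-- the precondition's ∃ guarantees B's scan stops at a nonnegative index
theorem pvGood_ret (xs : String) : ∀ (j : Nat) (nd : Int), j < xs.toList.length →
    (∃ k ∈ List.range (j + 1),
      xs.toList[k]? ≠ some '<' ∧ nd + pvBal xs.toList (k+1) (j + 1) ≤ 0) →
    ∃ k : Nat, pvBret xs nd (j : Int) (k : Int) := by
  intro j
  induction j with
  | zero =>
    intro nd hlen hex
    obtain ⟨k, hkr, hne, hbal⟩ := hex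
    have hk0 : k = 0 := by have := List.mem_range.mp hkr; omega
    subst hk0
    have hbal0 : pvBal xs.toList (0+1) (0+1) = 0 := by simp [pvBal]
    rw [hbal0] at hbal
    have hnd : ¬ 0 < nd := by omega
    have hr : xs.toList[0]? = some xs.toList[0] := List.getElem?_eq_getElem hlen
    have hg : PySem.Str.pyGet? xs ((0:Nat):Int) = some xs.toList[0] := by
      rw [PySem.Str.pyGet?_natCast]; exact hr
    have hne' : xs.toList[0] ≠ '<' := by rw [hr] at hne; simpa using hne
    exact ⟨0, (pvBret_ret (by omega) hg hne' hnd).mpr rfl⟩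
  | succ j IH =>
    intro nd hlen hex
    obtain ⟨k, hkr, hne, hbal⟩ := hex
    have hk : k < j + 2 := List.mem_range.mp hkr
    have hr : xs.toList[j+1]? = some xs.toList[j+1] := List.getElem?_eq_getElem hlen
    have hg : PySem.Str.pyGet? xs ((j+1:Nat):Int) = some xs.toList[j+1] := by
      rw [PySem.Str.pyGet?_natCast]; exact hr
    have hcast : ((j+1:Nat):Int) - 1 = (j:Int) := by push_cast; ring
    have hlen' : j < xs.toList.length := by omega
    by_cases hcc : xs.toList[j+1] = '<'
    · have hkne : k ≠ j + 1 := by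
        intro h; rw [h, hr, hcc] at hne; exact hne rfl
      have hbal' : pvBal xs.toList (k+1) ((j+1)+1) =
          pvBal xs.toList (k+1) (j+1) + pvChw (xs.toList.getD (j+1) ' ') :=
        pvBal_succ _ _ _ (by omega) hlen
      rw [List.getD_eq_getElem _ ' ' hlen, hcc] at hbal'
      have hchw : pvChw '<' = 1 := by simp [pvChw]
      obtain ⟨k', hB⟩ := IH (nd + 1) hlen'
        ⟨k, List.mem_range.mpr (by omega), hne, by rw [hbal', hchw] at hbal; omega⟩
      refine ⟨k', (pvBret_step_lt (by omega) (by rw [hg, hcc])).mpr ?_⟩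
      rw [hcast]
      exact hB
    · by_cases hd : 0 < nd
      · have hkne : k ≠ j + 1 := by
          intro h
          rw [h] at hbal
          have : pvBal xs.toList ((j+1)+1) ((j+1)+1) = 0 := by simp [pvBal]
          omega
        have hbal' : pvBal xs.toList (k+1) ((j+1)+1) =
            pvBal xs.toList (k+1) (j+1) + pvChw (xs.toList.getD (j+1) ' ') :=
          pvBal_succ _ _ _ (by omega) hlen
        rw [List.getD_eq_getElem _ ' ' hlen] at hbal'
        have hchw : pvChw xs.toList[j+1] = -1 := by simp [pvChw, hcc]
        obtain ⟨k', hB⟩ := IH (nd - 1) hlen'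
          ⟨k, List.mem_range.mpr (by omega), hne, by rw [hbal', hchw] at hbal; omega⟩
        refine ⟨k', (pvBret_step_consume (by omega) hg hcc hd).mpr ?_⟩
        rw [hcast]
        exact hB
      · exact ⟨j + 1, (pvBret_ret (by omega) hg hcc hd).mpr rfl⟩

-- A's first while follows B's scan
theorem pvW1_sim (xs : String) : ∀ (f : Nat) (d i k : Int), 0 ≤ i → pvBret xs d i k → 0 ≤ k →
    i.toNat + 1 ≤ f →
    ∃ d' i' c', pvW1 f d i xs = some (d', i') ∧ pvBret xs d' i' k ∧ i' ≤ i ∧ 0 ≤ i' ∧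
      PySem.Str.pyGet? xs i' = some c' ∧ c' ≠ '<' := by
  intro f
  induction f with
  | zero => intro d i k hi hB hk hf; omega
  | succ f IH =>
    intro d i k hi hB hk hf
    obtain ⟨c, hc⟩ := pvBret_read hB hi
    by_cases hcc : c = '<'
    · subst hcc
      have hB' : pvBret xs (d+1) (i-1) k := (pvBret_step_lt hi hc).mp hB
      have hi' : 0 ≤ i - 1 := by
        by_contra h
        have := (pvBret_neg (by omega)).mp hB'
        omega
      obtain ⟨d', i', c', h1, h2, h3, h4, h5, h6⟩ :=
        IH (d+1) (i-1) k hi' hB' hk (by omega)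
      refine ⟨d', i', c', ?_, h2, by omega, h4, h5, h6⟩
      rw [pvW1, hc]
      simpa using h1
    · refine ⟨d, i, c, ?_, hB, le_refl i, hi, hc, hcc⟩
      rw [pvW1, hc]
      simp [hcc]

-- A's second while follows B's scan
theorem pvW2_sim (xs : String) : ∀ (f : Nat) (d i k : Int), 0 ≤ i → pvBret xs d i k → 0 ≤ k →
    i.toNat + 1 ≤ f →
    ∃ d' i', pvW2 f d i xs = some (d', i') ∧ pvBret xs d' i' k ∧ 0 ≤ i' ∧
      (d' ≤ 0 ∨ PySem.Str.pyGet? xs i' = some '<') ∧ (i' = i ∨ i' < i) := by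
  intro f
  induction f with
  | zero => intro d i k hi hB hk hf; omega
  | succ f IH =>
    intro d i k hi hB hk hf
    by_cases hd : 0 < d
    · obtain ⟨c, hc⟩ := pvBret_read hB hi
      by_cases hcc : c = '<'
      · subst hcc
        refine ⟨d, i, ?_, hB, hi, Or.inr hc, Or.inl rfl⟩
        rw [pvW2, if_pos hd, hc]
        simp
      · have hB' : pvBret xs (d-1) (i-1) k := (pvBret_step_consume hi hc hcc hd).mp hB
        have hi' : 0 ≤ i - 1 := by
          by_contra h
          have := (pvBret_neg (by omega)).mp hB'
          omega
        obtain ⟨d', i', h1, h2, h3, h4, h5⟩ := IH (d-1) (i-1) k hi' hB' hk (by omega)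
        refine ⟨d', i', ?_, h2, h3, h4, by omega⟩
        rw [pvW2, if_pos hd, hc]
        simpa [hcc] using h1
    · refine ⟨d, i, ?_, hB, hi, Or.inl (by omega), Or.inl rfl⟩
      rw [pvW2, if_neg hd]

-- A returns what B's scan returns
theorem pvA_sim (xs : String) : ∀ (n : Nat) (i : Int), i.toNat < n → ∀ (f : Nat) (d k : Int),
    pvBret xs d i k → 0 ≤ k → i.toNat + 2 ≤ f → pvA f d i xs = some k := by
  intro n
  induction n with
  | zero => intro i hin; omega
  | succ n IH =>
    intro i hin f d k hB hk hf
    have hi : 0 ≤ i := pvBret_nonneg_i hB hk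
    obtain ⟨f', rfl⟩ : ∃ f', f = f' + 1 := ⟨f - 1, by omega⟩
    rw [pvA, if_neg (by omega : ¬ i < 0)]
    obtain ⟨d1, i1, c1, hW1, hB1, hle1, hi1, hc1, hne1⟩ :=
      pvW1_sim xs f' d i k hi hB hk (by omega)
    obtain ⟨d2, i2, hW2, hB2, hi2, hdisj, hcase⟩ :=
      pvW2_sim xs f' d1 i1 k hi1 hB1 hk (by omega)
    obtain ⟨c2, hc2⟩ := pvBret_read hB2 hi2
    simp only [hW1, hW2, hc2]
    by_cases hcc2 : c2 = '<'
    · have hlt : i2 < i1 := by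
        rcases hcase with h | h
        · exfalso; rw [h, hc1] at hc2; injection hc2 with h2; exact hne1 (h2.trans hcc2)
        · exact h
      simp only [if_pos hcc2]
      exact IH i2 (by omega) f' d2 k hB2 hk (by omega)
    · have hd2 : ¬ 0 < d2 := by
        rcases hdisj with h | h
        · omega
        · exfalso; rw [h] at hc2; injection hc2 with h2; exact hcc2 h2.symm
      have hki := (pvBret_ret hi2 hc2 hcc2 hd2).mp hB2
      simp only [if_neg hcc2, hki]

-- ===== VERDICT (by name: the statement is the Claim_ definition above) =====
theorem handle_dels_spec : Claim_equal_handle_dels := by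
  intro nd i xs hDom hPre
  unfold Spec_handle_dels handle_dels handle_dels_alt
  obtain ⟨hlen, hcase⟩ := hPre
  by_cases hi : i < 0
  · obtain ⟨f, hf⟩ : ∃ f, 2 * i.toNat + 2 * xs.toList.length + 8 = f + 1 := ⟨2 * i.toNat + 2 * xs.toList.length + 7, by omega⟩
    rw [hf, pvA, if_pos hi, pvB, if_neg (by omega : ¬ (0:Int) ≤ i)]
  · have hi0 : 0 ≤ i := by omega
    have hlenq : PySem.Str.len xs = (xs.toList.length : Int) := by simp [PySem.Str.len_eq]
    have hlen' : i.toNat < xs.toList.length := by rw [hlenq] at hlen; omega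
    have hex := hcase.resolve_left hi
    have hicast : ((i.toNat : Nat) : Int) = i := Int.toNat_of_nonneg hi0
    obtain ⟨k, hB⟩ := pvGood_ret xs i.toNat nd hlen' hex
    rw [hicast] at hB
    have hA := pvA_sim xs (i.toNat + 1) i (by omega)
      (2 * i.toNat + 2 * xs.toList.length + 8) nd (k : Int) hB (by omega) (by omega)
    rw [hA, pvBret_toFuel hB]
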